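-- pv_equiv track=rewrite | github.com/ggustin93/emg-c3d-analyzer | backend/tests/unit/emg/test_csv_export.py | _parse_csv_content
-- ===== SOURCE A (Python) =====
-- def _parse_csv_content(csv_content):
--     """Parse CSV content into structured data for validation."""
--     lines = csv_content.strip().split('\n')
--     sections = {}
--     current_section = None
--     current_data = []
--
--     for line in lines:
--         line = line.strip()
--         if not line or line.startswith('#'):
--             continue
--
--         # Section headers
--         if line.startswith('"=== ') and line.endswith(' ==="'):
--             if current_section:
--                 sections[current_section] = current_data
--             current_section = line.strip('"').replace('=== ', '').replace(' ===', '')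
--             current_data = []
--         else:
--             current_data.append(line)
--
--     # Add final section
--     if current_section:
--         sections[current_section] = current_data
--
--     return sections
-- ===== SOURCE B (Python) =====
-- def _parse_csv_content(csv_content):
--     """Parse CSV content into structured data for validation."""
--     # Clean first: strip every line, drop blanks and '#'-comments.
--     cleaned = [l for l in (x.strip() for x in csv_content.strip().split('\n'))
--                if l and not l.startswith('#')]
--
--     def is_header(l):
--         return l.startswith('"=== ') and l.endswith(' ==="')
--
--     sections = {}
--     n = len(cleaned)
--     i = 0
--     # Discard everything before the first header.
--     while i < n and not is_header(cleaned[i]):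
--         i += 1
--     # Each section's data is the slice between its header and the next one.
--     while i < n:
--         name = cleaned[i].strip('"').replace('=== ', '').replace(' ===', '')
--         j = i + 1
--         while j < n and not is_header(cleaned[j]):
--             j += 1
--         if name:
--             sections[name] = cleaned[i + 1:j]
--         i = j
--     return sections
-- ===== Notes on version B (the rewrite author's own statement) =====
-- stated objective: alternative
-- what changed: A interleaves stripping/filtering and section flushing in one accumulator loop with current-section state; B first builds the cleaned line list, then scans it header-by-header, taking each section's data as the run of lines up to the next header (no current_section/current_data accumulator).
import Mathlib
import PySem

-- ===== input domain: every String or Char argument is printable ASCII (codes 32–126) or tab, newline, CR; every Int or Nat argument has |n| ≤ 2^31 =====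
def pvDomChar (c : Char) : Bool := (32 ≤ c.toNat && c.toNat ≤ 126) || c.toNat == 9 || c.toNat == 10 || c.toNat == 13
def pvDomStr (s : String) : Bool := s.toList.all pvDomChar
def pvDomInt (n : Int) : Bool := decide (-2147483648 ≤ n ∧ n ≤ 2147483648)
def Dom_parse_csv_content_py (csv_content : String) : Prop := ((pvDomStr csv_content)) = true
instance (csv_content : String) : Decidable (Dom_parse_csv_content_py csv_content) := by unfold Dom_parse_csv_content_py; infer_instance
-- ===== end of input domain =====

-- B replaces A's single accumulator loop (current_section/current_data with flush-on-header)
-- by a two-phase decomposition: clean the lines first, then slice between consecutive headers.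

-- helpers shared by both ports (the same string expressions appear in both Python sources)
def pvIsHeader (l : String) : Bool :=
  PySem.Str.startswith l "\"=== " && PySem.Str.endswith l " ===\""

def pvName (l : String) : String :=
  PySem.Str.replace (PySem.Str.replace (PySem.Str.stripChars l "\"") "=== " "") " ===" ""

-- ===== PORT A =====
-- 'if current_section: sections[current_section] = current_data' (None and "" are falsy)
def pvFlushA (d : PySem.Dict String (List String)) (cur : Option String)
    (data : List String) : PySem.Dict String (List String) :=
  match cur with
  | none => d
  | some s => if s == "" then d else d.insert s data

-- one iteration of A's for-loop over (sections, current_section, current_data)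
def pvStepA (st : PySem.Dict String (List String) × Option String × List String)
    (line : String) : PySem.Dict String (List String) × Option String × List String :=
  let l := PySem.Str.strip line
  if l == "" || PySem.Str.startswith l "#" then st
  else if pvIsHeader l then (pvFlushA st.1 st.2.1 st.2.2, some (pvName l), [])
  else (st.1, st.2.1, st.2.2 ++ [l])

def parse_csv_content_py (csv_content : String) : List (String × List String) :=
  let lines := (PySem.Str.split? (PySem.Str.strip csv_content) "\n").getD []
  let st := lines.foldl pvStepA (PySem.Dict.empty, none, [])
  (pvFlushA st.1 st.2.1 st.2.2).items

-- ===== PORT B =====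
-- 'if l and not l.startswith("#")'
def pvKeep (l : String) : Bool := !(l == "") && !(PySem.Str.startswith l "#")

-- B's outer while-loop: the leading-skip phase is the else branch; the inner
-- 'while j < n and not is_header' scan is the takeWhile/dropWhile split,
-- and cleaned[i+1:j] is exactly that takeWhile.
def pvScan : List String → PySem.Dict String (List String) → PySem.Dict String (List String)
  | [], d => d
  | x :: xs, d =>
    if pvIsHeader x then
      pvScan (xs.dropWhile (fun l => !pvIsHeader l))
        (if pvName x == "" then d
         else d.insert (pvName x) (xs.takeWhile (fun l => !pvIsHeader l)))
    else pvScan xs d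
termination_by l _ => l.length
decreasing_by
  · have := List.length_dropWhile_le (fun l => !pvIsHeader l) xs
    simp; omega
  · simp

def parse_csv_content_py_alt (csv_content : String) : List (String × List String) :=
  let cleaned := (((PySem.Str.split? (PySem.Str.strip csv_content) "\n").getD []).map
      PySem.Str.strip).filter pvKeep
  (pvScan cleaned PySem.Dict.empty).items

-- ===== PRECONDITION & SPEC =====
def Spec_parse_csv_content_py (csv_content : String) (out : List (String × List String)) : Prop := out = parse_csv_content_py_alt csv_content
instance (csv_content : String) (out : List (String × List String)) : Decidable (Spec_parse_csv_content_py csv_content out) := by unfold Spec_parse_csv_content_py; infer_instance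

-- ===== CLAIM (what is proved, stated in full; the proofs are below) =====
def Claim_equal_parse_csv_content_py : Prop := ∀ (csv_content : String), Dom_parse_csv_content_py csv_content → Spec_parse_csv_content_py csv_content (parse_csv_content_py csv_content)

-- ===== LEMMAS AND PROOFS =====

-- A's loop body on an already-cleaned line
def pvStepC (st : PySem.Dict String (List String) × Option String × List String)
    (l : String) : PySem.Dict String (List String) × Option String × List String :=
  if pvIsHeader l then (pvFlushA st.1 st.2.1 st.2.2, some (pvName l), [])
  else (st.1, st.2.1, st.2.2 ++ [l])

def pvFinal (st : PySem.Dict String (List String) × Option String × List String) :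
    PySem.Dict String (List String) := pvFlushA st.1 st.2.1 st.2.2

lemma pvStepA_eq (st : PySem.Dict String (List String) × Option String × List String)
    (line : String) :
    pvStepA st line =
      if pvKeep (PySem.Str.strip line) then pvStepC st (PySem.Str.strip line) else st := by
  simp only [pvStepA, pvStepC, pvKeep]
  cases h1 : (PySem.Str.strip line == "") <;>
    cases h2 : PySem.Str.startswith (PySem.Str.strip line) "#" <;> simp

lemma pvFold_filter (lines : List String)
    (st : PySem.Dict String (List String) × Option String × List String) :
    lines.foldl pvStepA st = ((lines.map PySem.Str.strip).filter pvKeep).foldl pvStepC st := by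
  induction lines generalizing st with
  | nil => rfl
  | cons x xs ih =>
    simp only [List.foldl_cons, List.map_cons, List.filter_cons, pvStepA_eq]
    cases h : pvKeep (PySem.Str.strip x) <;> simp [ih]

lemma pvScan_inSection (cl : List String) (d : PySem.Dict String (List String))
    (name : String) (data : List String) :
    pvFinal (cl.foldl pvStepC (d, some name, data)) =
      pvScan (cl.dropWhile (fun l => !pvIsHeader l))
        (if name == "" then d
         else d.insert name (data ++ cl.takeWhile (fun l => !pvIsHeader l))) := by
  induction cl generalizing d name data with
  | nil => simp [pvFinal, pvFlushA, pvScan]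
  | cons x xs ih =>
    by_cases h : pvIsHeader x
    · simp only [List.foldl_cons, pvStepC, if_pos, List.dropWhile_cons, List.takeWhile_cons,
        h, Bool.not_true, ih]
      simp [pvScan, h, pvFlushA]
    · have h' : pvIsHeader x = false := by simpa using h
      simp only [List.foldl_cons, pvStepC, h', List.dropWhile_cons, List.takeWhile_cons,
        Bool.not_false, if_true, Bool.false_eq_true, if_false]
      rw [ih]
      simp [List.append_assoc]

lemma pvScan_noSection (cl : List String) (d : PySem.Dict String (List String))
    (data : List String) :
    pvFinal (cl.foldl pvStepC (d, none, data)) = pvScan cl d := by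
  induction cl generalizing data with
  | nil => simp [pvFinal, pvFlushA, pvScan]
  | cons x xs ih =>
    by_cases h : pvIsHeader x
    · simp only [List.foldl_cons, pvStepC, h, if_pos]
      rw [pvScan_inSection]
      simp [pvScan, h, pvFlushA]
    · have h' : pvIsHeader x = false := by simpa using h
      simp only [List.foldl_cons, pvStepC, h']
      rw [pvScan]
      simp [h', ih]

-- ===== VERDICT (by name: the statement is the Claim_ definition above) =====
theorem parse_csv_content_py_spec : Claim_equal_parse_csv_content_py := by
  intro csv_content _
  unfold Spec_parse_csv_content_py parse_csv_content_py parse_csv_content_py_alt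
  simp only []
  rw [pvFold_filter]
  have := pvScan_noSection
    ((((PySem.Str.split? (PySem.Str.strip csv_content) "\n").getD []).map
      PySem.Str.strip).filter pvKeep) PySem.Dict.empty []
  simp only [pvFinal] at this
  rw [this]
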